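-- pv_equiv track=rewrite | github.com/MrBrantCode/unitest_baseline | mut_generate/mist_train_taco/taco_11998/solution.py | calculate_max_final_value
-- ===== SOURCE A (Python) =====
-- def calculate_max_final_value(T: str) -> int:
--     def f(n, r, l, z):
--         if n % 2 == 0:
--             move = r - l + z
--             return (move + 1) * (n // 2)
--         if r == l and r % 2 == 0:
--             k = (n - 1) // 2
--             move = r - l + z
--             return (move + 1) * k
--         ev = r // 2 - (l - 1) // 2
--         od = r - l + 1 - ev
--         od += z
--         k = (n - 1) // 2
--         return ev * k + od * (k + 1)
--
--     Z = T.count('0')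
--     one = 0
--     to = 0
--     answer = 0
--
--     for i, x in enumerate(T, 1):
--         if x == '0':
--             if one:
--                 answer += f(one, i - 1, to, Z)
--                 one = 0
--             Z -= 1
--             continue
--         to += 1
--         one += 1
--
--     if one:
--         answer += f(one, i, to, Z)
--
--     def f(n):
--         ret = 0
--         for i in range(0, n, 2):
--             ret += n - i
--         ret -= (n + 1) // 2
--         return ret
--
--     n = T.count('1')
--     answer += f(n)
--     return answer
-- ===== SOURCE B (Python) =====
-- def calculate_max_final_value(T: str) -> int:
--     def run_value(m, r, l, z):
--         half = m // 2
--         if m % 2 == 0 or (r == l and r % 2 == 0):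
--             return (r - l + z + 1) * half
--         ev = r // 2 - (l - 1) // 2
--         return (r - l + 1 + z) * half + (r - l + 1 - ev + z)
--
--     parts = T.split('0')
--     total_zeros = len(parts) - 1
--     answer = 0
--     ones = 0
--     for j, part in enumerate(parts):
--         m = len(part)
--         if m == 0:
--             continue
--         ones += m
--         answer += run_value(m, ones + j, ones, total_zeros - j)
--
--     n = T.count('1')
--     t = (n + 1) // 2
--     return answer + t * (n - t)
-- ===== Notes on version B (the rewrite author's own statement) =====
-- stated objective: simpler
-- what changed: B replaces A's character-by-character state machine (with its mid-loop flush, trailing flush and shadowed second helper f) by a single pass over T.split('0') runs keeping a part index and a running ones total, and replaces the second helper's loop over range(0, n, 2) by its closed form t*(n-t) with t=(n+1)//2.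
import Mathlib
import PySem

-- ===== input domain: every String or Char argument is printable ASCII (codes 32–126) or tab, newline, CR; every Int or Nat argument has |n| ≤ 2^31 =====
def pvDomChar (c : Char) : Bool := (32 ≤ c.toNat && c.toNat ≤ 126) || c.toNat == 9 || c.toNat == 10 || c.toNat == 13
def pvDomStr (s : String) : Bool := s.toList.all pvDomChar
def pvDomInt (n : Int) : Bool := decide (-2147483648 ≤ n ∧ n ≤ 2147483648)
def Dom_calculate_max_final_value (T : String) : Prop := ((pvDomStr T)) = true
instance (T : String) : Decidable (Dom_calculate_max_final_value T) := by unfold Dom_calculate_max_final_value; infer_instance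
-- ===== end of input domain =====

-- B re-implements the character-by-character state machine as a pass over T.split('0') runs
-- with a closed form for the final f(n); objective: simpler/alternative decomposition, same results.

-- ===== PORT A =====
-- helper f(n, r, l, z) of A, exact transliteration ('//' and '%' are Python floor div/mod)
def pvA_f (n r l z : Int) : Int :=
  if PySem.Int.mod n 2 == 0 then
    let move := r - l + z
    (move + 1) * PySem.Int.floordiv n 2
  else if r == l && PySem.Int.mod r 2 == 0 then
    let k := PySem.Int.floordiv (n - 1) 2
    let move := r - l + z
    (move + 1) * k
  else
    let ev := PySem.Int.floordiv r 2 - PySem.Int.floordiv (l - 1) 2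
    let od := r - l + 1 - ev + z
    let k := PySem.Int.floordiv (n - 1) 2
    ev * k + od * (k + 1)

-- the second (shadowing) helper f(n): loop over range(0, n, 2)
def pvA_f2 (n : Int) : Int :=
  (PySem.List.pyRange 0 n 2).foldl (fun ret i => ret + (n - i)) 0 - PySem.Int.floordiv (n + 1) 2

-- the body of A's 'for i, x in enumerate(T, 1)' loop; state (Z, one, toAcc, answer)
def pvAStep (st : Int × Int × Int × Int) (p : Int × Char) : Int × Int × Int × Int :=
  let (Z, one, toAcc, answer) := st
  let (i, x) := p
  if x == '0' then
    if one ≠ 0 then (Z - 1, 0, toAcc, answer + pvA_f one (i - 1) toAcc Z)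
    else (Z - 1, one, toAcc, answer)
  else (Z, one + 1, toAcc + 1, answer)

def calculate_max_final_value (T : String) : Int :=
  let Z0 : Int := (PySem.Str.count T "0" : Int)
  let st := (PySem.List.enumerate T.toList 1).foldl pvAStep (Z0, 0, 0, 0)
  -- trailing flush: Python's i equals len(T) here (one ≠ 0 forces T nonempty)
  let answer := if st.2.1 ≠ 0 then st.2.2.2 + pvA_f st.2.1 (PySem.Str.len T : Int) st.2.2.1 st.1
                else st.2.2.2
  answer + pvA_f2 (PySem.Str.count T "1" : Int)

-- ===== PORT B =====
-- B's run_value helper (algebraically regrouped form of the per-run weight)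
def pvB_runValue (m r l z : Int) : Int :=
  let half := PySem.Int.floordiv m 2
  if PySem.Int.mod m 2 == 0 || (r == l && PySem.Int.mod r 2 == 0) then
    (r - l + z + 1) * half
  else
    let ev := PySem.Int.floordiv r 2 - PySem.Int.floordiv (l - 1) 2
    (r - l + 1 + z) * half + (r - l + 1 - ev + z)

-- the body of B's 'for j, part in enumerate(parts)' loop; state (ones, answer)
def pvBStep (totalZeros : Int) (st : Int × Int) (p : Int × List Char) : Int × Int :=
  let (ones, answer) := st
  let (j, part) := p
  let m : Int := (part.length : Int)
  if m == 0 then (ones, answer)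
  else (ones + m, answer + pvB_runValue m (ones + m + j) (ones + m) (totalZeros - j))

def calculate_max_final_value_alt (T : String) : Int :=
  -- T.split('0'): PySem.Chars.splitOn is Python's str.split for a nonempty separator
  let parts := PySem.Chars.splitOn T.toList "0".toList
  let totalZeros : Int := (parts.length : Int) - 1
  let st := (PySem.List.enumerate parts 0).foldl (pvBStep totalZeros) (0, 0)
  let n : Int := (PySem.Str.count T "1" : Int)
  let t := PySem.Int.floordiv (n + 1) 2
  st.2 + t * (n - t)

-- ===== PRECONDITION & SPEC =====
def Spec_calculate_max_final_value (T : String) (out : Int) : Prop := out = calculate_max_final_value_alt T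
instance (T : String) (out : Int) : Decidable (Spec_calculate_max_final_value T out) := by unfold Spec_calculate_max_final_value; infer_instance

-- ===== CLAIM (what is proved, stated in full; the proofs are below) =====
def Claim_equal_calculate_max_final_value : Prop := ∀ (T : String), Dom_calculate_max_final_value T → Spec_calculate_max_final_value T (calculate_max_final_value T)

-- ===== LEMMAS AND PROOFS =====

-- A's remaining work on the suffix cs from A-state (i, Z, one, toAcc, ans), including the trailing flush
def pvAProc (cs : List Char) (i Z one toAcc ans : Int) : Int :=
  let st := (PySem.List.enumerate cs i).foldl pvAStep (Z, one, toAcc, ans)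
  if st.2.1 ≠ 0 then st.2.2.2 + pvA_f st.2.1 (i + (cs.length : Int) - 1) st.2.2.1 st.1 else st.2.2.2

-- B's remaining work on a list of parts starting at part index j0
def pvBRun (parts : List (List Char)) (j0 ones ans zt : Int) : Int :=
  ((PySem.List.enumerate parts j0).foldl (pvBStep zt) (ones, ans)).2

-- structural form of Python's s.split('0') with the pending run 'cur' reversed
def pvSplitList : List Char → List Char → List (List Char)
  | [], cur => [cur.reverse]
  | c :: rest, cur => if c = '0' then cur.reverse :: pvSplitList rest [] else pvSplitList rest (c :: cur)

theorem pvSplitOn_go_eq (fuel : Nat) : ∀ (l cur : List Char) (acc : List (List Char)),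
    l.length < fuel →
    PySem.Chars.splitOn.go ['0'] fuel l cur acc = acc.reverse ++ pvSplitList l cur := by
  induction fuel with
  | zero => intro l cur acc h; exact absurd h (Nat.not_lt_zero _)
  | succ fuel ih =>
    intro l cur acc h
    cases l with
    | nil => simp [PySem.Chars.splitOn.go, pvSplitList]
    | cons c rest =>
      by_cases hc : c = '0'
      · subst hc
        rw [PySem.Chars.splitOn.go]
        have hpre : (['0'].isPrefixOf ('0' :: rest)) = true := by simp [List.isPrefixOf]
        rw [hpre]
        simp only [if_true, List.length_singleton, List.drop_one, List.tail_cons]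
        rw [ih rest [] (cur.reverse :: acc) (by simp at h ⊢; omega)]
        simp [pvSplitList]
      · rw [PySem.Chars.splitOn.go]
        have hpre : (['0'].isPrefixOf (c :: rest)) = false := by
          simp [List.isPrefixOf]; exact fun hh => absurd hh.symm hc
        rw [hpre]
        simp only [Bool.false_eq_true, if_false]
        rw [ih rest (c :: cur) acc (by simp at h ⊢; omega)]
        simp [pvSplitList, hc]

theorem pvSplitOn_eq (cs : List Char) :
    PySem.Chars.splitOn cs ['0'] = pvSplitList cs [] := by
  unfold PySem.Chars.splitOn
  rw [pvSplitOn_go_eq (cs.length + 1) cs [] [] (by omega)]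
  simp

theorem pvSplitList_length (cs : List Char) : ∀ cur,
    (pvSplitList cs cur).length = cs.count '0' + 1 := by
  induction cs with
  | nil => intro cur; simp [pvSplitList]
  | cons c rest ih =>
    intro cur
    by_cases hc : c = '0' <;> simp [pvSplitList, hc, ih]

theorem pvCountGo_eq (fuel : Nat) : ∀ (l : List Char) (acc : Nat),
    l.length ≤ fuel →
    PySem.Chars.count.go ['0'] fuel l acc = acc + l.count '0' := by
  induction fuel with
  | zero =>
    intro l acc h
    have : l = [] := List.length_eq_zero_iff.mp (Nat.le_zero.mp h)
    subst this
    simp [PySem.Chars.count.go]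
  | succ fuel ih =>
    intro l acc h
    cases l with
    | nil => simp [PySem.Chars.count.go]
    | cons c rest =>
      by_cases hc : c = '0'
      · subst hc
        rw [PySem.Chars.count.go]
        have hpre : (['0'].isPrefixOf ('0' :: rest)) = true := by simp [List.isPrefixOf]
        rw [hpre]
        simp only [if_true, List.length_singleton, List.drop_one, List.tail_cons]
        rw [ih rest (acc + 1) (by simp at h ⊢; omega)]
        simp
        omega
      · rw [PySem.Chars.count.go]
        have hpre : (['0'].isPrefixOf (c :: rest)) = false := by
          simp [List.isPrefixOf]; exact fun hh => absurd hh.symm hc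
        rw [hpre]
        simp only [Bool.false_eq_true, if_false]
        rw [ih rest acc (by simp at h ⊢; omega)]
        simp [hc]

theorem pvCount_eq (T : String) : PySem.Str.count T "0" = T.toList.count '0' := by
  rw [PySem.Str.count_eq]
  have hl : ("0" : String).toList = ['0'] := rfl
  rw [hl]
  unfold PySem.Chars.count
  simp only [List.isEmpty_cons, if_false, Bool.false_eq_true]
  rw [pvCountGo_eq T.toList.length T.toList 0 (le_refl _)]
  omega

-- the two per-run helpers agree for run length n ≥ 1
theorem pvF_eq_runValue (n r l z : Int) : pvA_f n r l z = pvB_runValue n r l z := by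
  unfold pvA_f pvB_runValue
  have h2 : (0 : Int) < 2 := by norm_num
  simp only [PySem.Int.floordiv_eq_ediv_of_pos h2, PySem.Int.mod_eq_emod_of_pos h2]
  by_cases hpar : n % 2 = 0
  · simp only [hpar, beq_self_eq_true, if_pos, Bool.true_or]
  · have hodd : (n - 1) / 2 = n / 2 := by omega
    have hb : (n % 2 == 0) = false := by simpa using hpar
    simp only [hb, Bool.false_or, if_false, Bool.false_eq_true]
    by_cases hr : r = l ∧ r % 2 = 0
    · obtain ⟨he, hm2⟩ := hr
      subst he
      have hb2 : (r == r && r % 2 == 0) = true := by simp [hm2]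
      simp only [hb2, if_pos]
      rw [hodd]
    · have hb2 : (r == l && r % 2 == 0) = false := by
        rcases not_and_or.mp hr with h | h
        · have h1 : (r == l) = false := by simpa using h
          simp [h1]
        · have h1 : ((r % 2 : Int) == 0) = false := by simpa using h
          simp [h1]
      simp only [hb2, if_false, Bool.false_eq_true]
      rw [hodd]
      ring

-- closed form of A's second helper f(n) for n ≥ 0
theorem pvSumArith (m : Nat) (n : Int) :
    ((List.range m).map (fun (j : Nat) => n - (0 + 2 * (j : Int)))).sum = m * n - m * (m - 1) := by
  induction m with
  | zero => simp
  | succ m ih =>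
    rw [List.range_succ, List.map_append, List.sum_append, ih]
    simp only [List.map_cons, List.map_nil, List.sum_cons, List.sum_nil]
    push_cast
    ring

theorem pvF2_closed (k : Nat) :
    pvA_f2 (k : Int) =
      PySem.Int.floordiv ((k : Int) + 1) 2 * ((k : Int) - PySem.Int.floordiv ((k : Int) + 1) 2) := by
  unfold pvA_f2
  have h2 : (0 : Int) < 2 := by norm_num
  rw [PySem.List.pyRange_of_pos _ _ h2, PySem.Int.floordiv_eq_ediv_of_pos h2]
  rcases Nat.eq_zero_or_pos k with h0 | hpos
  · subst h0; simp
  · have hlt : (0 : Int) < (k : Int) := by exact_mod_cast hpos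
    rw [if_pos hlt]
    rw [PySem.List.foldl_add _ (fun i => (k : Int) - i) 0]
    rw [List.map_map]
    have hcomp : ((fun i => (k : Int) - i) ∘ fun j : Nat => 0 + 2 * (j : Int))
        = fun (j : Nat) => (k : Int) - (0 + 2 * (j : Int)) := rfl
    rw [hcomp, pvSumArith]
    have harg : ((k : Int) - 0 + 2 - 1) = (k : Int) + 1 := by ring
    rw [harg]
    have ht : (((((k : Int) + 1) / 2).toNat : Nat) : Int) = ((k : Int) + 1) / 2 := by omega
    rw [ht]
    ring

theorem pvAProc_len_shift (c : Char) (rest : List Char) (i : Int) :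
    i + ((c :: rest).length : Int) - 1 = (i + 1) + (rest.length : Int) - 1 := by
  simp [List.length_cons]; ring

theorem pvAProc_cons_ne (c : Char) (rest : List Char) (i Z one toAcc ans : Int) (h : ¬ c = '0') :
    pvAProc (c :: rest) i Z one toAcc ans = pvAProc rest (i + 1) Z (one + 1) (toAcc + 1) ans := by
  unfold pvAProc
  rw [PySem.List.enumerate_cons, List.foldl_cons, pvAProc_len_shift]
  have hstep : pvAStep (Z, one, toAcc, ans) (i, c) = (Z, one + 1, toAcc + 1, ans) := by
    simp [pvAStep, h]
  rw [hstep]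


theorem pvAProc_cons_zero (rest : List Char) (i Z one toAcc ans : Int) (h : one ≠ 0) :
    pvAProc ('0' :: rest) i Z one toAcc ans
      = pvAProc rest (i + 1) (Z - 1) 0 toAcc (ans + pvA_f one (i - 1) toAcc Z) := by
  unfold pvAProc
  rw [PySem.List.enumerate_cons, List.foldl_cons, pvAProc_len_shift]
  have hstep : pvAStep (Z, one, toAcc, ans) (i, '0')
      = (Z - 1, 0, toAcc, ans + pvA_f one (i - 1) toAcc Z) := by
    simp [pvAStep, h]
  rw [hstep]

theorem pvAProc_cons_zero' (rest : List Char) (i Z toAcc ans : Int) :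
    pvAProc ('0' :: rest) i Z 0 toAcc ans = pvAProc rest (i + 1) (Z - 1) 0 toAcc ans := by
  unfold pvAProc
  rw [PySem.List.enumerate_cons, List.foldl_cons, pvAProc_len_shift]
  have hstep : pvAStep (Z, 0, toAcc, ans) (i, '0') = (Z - 1, 0, toAcc, ans) := by
    simp [pvAStep]
  rw [hstep]

theorem pvBRun_cons_nil (parts : List (List Char)) (j0 ones ans zt : Int) :
    pvBRun ([] :: parts) j0 ones ans zt = pvBRun parts (j0 + 1) ones ans zt := by
  unfold pvBRun
  rw [PySem.List.enumerate_cons, List.foldl_cons]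
  have hstep : pvBStep zt (ones, ans) (j0, ([] : List Char)) = (ones, ans) := by
    simp [pvBStep]
  rw [hstep]

theorem pvBRun_cons (part : List Char) (parts : List (List Char)) (j0 ones ans zt : Int)
    (h : part ≠ []) :
    pvBRun (part :: parts) j0 ones ans zt
      = pvBRun parts (j0 + 1) (ones + (part.length : Int))
          (ans + pvB_runValue (part.length : Int) (ones + (part.length : Int) + j0)
            (ones + (part.length : Int)) (zt - j0)) zt := by
  unfold pvBRun
  rw [PySem.List.enumerate_cons, List.foldl_cons]
  have hm : ((part.length : Int) == 0) = false := by
    simp [List.length_eq_zero_iff, h]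
  have hstep : pvBStep zt (ones, ans) (j0, part)
      = (ones + (part.length : Int), ans + pvB_runValue (part.length : Int)
          (ones + (part.length : Int) + j0) (ones + (part.length : Int)) (zt - j0)) := by
    simp only [pvBStep, hm, Bool.false_eq_true, if_false]
  rw [hstep]

theorem pvAProc_nil (i Z one toAcc ans : Int) :
    pvAProc [] i Z one toAcc ans = if one ≠ 0 then ans + pvA_f one (i - 1) toAcc Z else ans := by
  unfold pvAProc
  rw [PySem.List.enumerate_nil]
  simp

theorem pvBRun_nil (j0 ones ans zt : Int) : pvBRun [] j0 ones ans zt = ans := by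
  unfold pvBRun
  rw [PySem.List.enumerate_nil]
  simp

-- the main correspondence: A's state machine on the suffix cs equals B's run walk on split(cs)
theorem pvMain (cs : List Char) : ∀ (cur : List Char) (j0 toAcc ans zt : Int),
    zt = j0 + (cs.count '0' : Int) →
    pvAProc cs (j0 + toAcc + 1) (zt - j0) (cur.length : Int) toAcc ans
      = pvBRun (pvSplitList cs cur) j0 (toAcc - (cur.length : Int)) ans zt := by
  induction cs with
  | nil =>
    intro cur j0 toAcc ans zt hzt
    simp only [List.count_nil, Nat.cast_zero, add_zero] at hzt
    subst hzt
    rw [pvAProc_nil]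
    by_cases hcur : cur = []
    · subst hcur
      simp [pvSplitList, pvBRun_cons_nil, pvBRun_nil]
    · have hm1 : (1 : Int) ≤ (cur.length : Int) := by
        have := List.length_pos_iff.mpr hcur
        omega
      rw [if_pos (by omega : ((cur.length : Int)) ≠ 0)]
      have hsp : pvSplitList [] cur = [cur.reverse] := by simp [pvSplitList]
      rw [hsp]
      rw [pvBRun_cons _ _ _ _ _ _ (by simpa using hcur)]
      rw [pvBRun_nil, List.length_reverse]
      rw [pvF_eq_runValue]
      have e0 : toAcc - (cur.length : Int) + (cur.length : Int) = toAcc := by ring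
      rw [e0]
      have e1 : zt + toAcc + 1 - 1 = toAcc + zt := by ring
      rw [e1]
  | cons c rest ih =>
    intro cur j0 toAcc ans zt hzt
    by_cases hc : c = '0'
    · subst hc
      have hsp : pvSplitList ('0' :: rest) cur = cur.reverse :: pvSplitList rest [] := by
        simp [pvSplitList]
      rw [hsp]
      have hcount : zt = (j0 + 1) + (rest.count '0' : Int) := by
        rw [hzt]
        simp
        ring
      by_cases hcur : cur = []
      · subst hcur
        simp only [List.length_nil, Nat.cast_zero, sub_zero]
        rw [pvAProc_cons_zero']
        rw [List.reverse_nil, pvBRun_cons_nil]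
        have hih := ih [] (j0 + 1) toAcc ans zt hcount
        simp only [List.length_nil, Nat.cast_zero, sub_zero] at hih
        have e1 : j0 + 1 + toAcc + 1 = j0 + toAcc + 1 + 1 := by ring
        have e2 : zt - (j0 + 1) = zt - j0 - 1 := by ring
        rw [e1, e2] at hih
        exact hih
      · have hm1 : (1 : Int) ≤ (cur.length : Int) := by
          have := List.length_pos_iff.mpr hcur
          omega
        rw [pvAProc_cons_zero _ _ _ _ _ _ (by omega : ((cur.length : Int)) ≠ 0)]
        rw [pvBRun_cons _ _ _ _ _ _ (by simpa using hcur)]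
        rw [List.length_reverse]
        rw [pvF_eq_runValue]
        have e0 : toAcc - (cur.length : Int) + (cur.length : Int) = toAcc := by ring
        rw [e0]
        have e1 : j0 + toAcc + 1 - 1 = toAcc + j0 := by ring
        rw [e1]
        have hih := ih [] (j0 + 1) toAcc
          (ans + pvB_runValue (cur.length : Int) (toAcc + j0) toAcc (zt - j0)) zt hcount
        simp only [List.length_nil, Nat.cast_zero, sub_zero] at hih
        have e3 : j0 + 1 + toAcc + 1 = j0 + toAcc + 1 + 1 := by ring
        have e4 : zt - (j0 + 1) = zt - j0 - 1 := by ring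
        rw [e3, e4] at hih
        exact hih
    · rw [pvAProc_cons_ne c rest _ _ _ _ _ hc]
      have hsp : pvSplitList (c :: rest) cur = pvSplitList rest (c :: cur) := by
        simp [pvSplitList, hc]
      rw [hsp]
      have hcount : zt = j0 + (rest.count '0' : Int) := by
        rw [hzt]
        simp [hc]
      have hih := ih (c :: cur) j0 (toAcc + 1) ans zt hcount
      simp only [List.length_cons, Nat.cast_add, Nat.cast_one] at hih
      have e1 : j0 + (toAcc + 1) + 1 = j0 + toAcc + 1 + 1 := by ring
      have e2 : toAcc + 1 - ((cur.length : Int) + 1) = toAcc - (cur.length : Int) := by ring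
      rw [e1, e2] at hih
      exact hih

-- ===== VERDICT (by name: the statement is the Claim_ definition above) =====
theorem calculate_max_final_value_spec : Claim_equal_calculate_max_final_value := by
  unfold Claim_equal_calculate_max_final_value
  intro T _
  unfold Spec_calculate_max_final_value
  simp only [calculate_max_final_value, calculate_max_final_value_alt]
  have htl : ("0" : String).toList = ['0'] := rfl
  rw [htl, pvSplitOn_eq, pvCount_eq, pvSplitList_length, pvF2_closed]
  have hz : (((T.toList.count '0' + 1 : Nat) : Int)) - 1 = ((T.toList.count '0' : Nat) : Int) := by
    push_cast
    ring
  rw [hz]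
  have key := pvMain T.toList [] 0 0 0 ((T.toList.count '0' : Nat) : Int) (by ring)
  simp only [List.length_nil, Nat.cast_zero, sub_zero, zero_add, add_zero] at key
  unfold pvAProc pvBRun at key
  have e : (1 : Int) + (T.toList.length : Int) - 1 = PySem.Str.len T := by
    rw [PySem.Str.len_eq]
    ring
  rw [e] at key
  rw [key]
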